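-- pv_equiv track=rewrite | github.com/iyvan/data_view | prepare/clean/dataclean.py | calcdroppairs
-- ===== SOURCE A (Python) =====
-- def calcdroppairs(pairslist):
--     """
--     由干净的数据起止对，计算出垃圾数据起止对
--     :param pairslist: 干净数据的开始和结束坐标对
--     :return: 垃圾数据的开始和结束坐标对
--     """
--     res = []
--     for i, v in enumerate(pairslist):
--
--         if i == 0:
--             x0 = v[1]
--         else:
--             x1 = v[0]
--             res.append((x0, x1))
--             x0 = v[1]
--     return res
-- ===== SOURCE B (Python) =====
-- def calcdroppairs(pairslist):
--     ends = [v[1] for v in pairslist]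
--     starts = [v[0] for v in pairslist]
--     return list(zip(ends[:-1], starts[1:]))
-- ===== Notes on version B (the rewrite author's own statement) =====
-- stated objective: idiomatic
-- what changed: Replaces the stateful enumerate loop carrying x0 across iterations with two element-wise projection passes (ends, starts) combined by zipping adjacent slices.
import Mathlib
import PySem

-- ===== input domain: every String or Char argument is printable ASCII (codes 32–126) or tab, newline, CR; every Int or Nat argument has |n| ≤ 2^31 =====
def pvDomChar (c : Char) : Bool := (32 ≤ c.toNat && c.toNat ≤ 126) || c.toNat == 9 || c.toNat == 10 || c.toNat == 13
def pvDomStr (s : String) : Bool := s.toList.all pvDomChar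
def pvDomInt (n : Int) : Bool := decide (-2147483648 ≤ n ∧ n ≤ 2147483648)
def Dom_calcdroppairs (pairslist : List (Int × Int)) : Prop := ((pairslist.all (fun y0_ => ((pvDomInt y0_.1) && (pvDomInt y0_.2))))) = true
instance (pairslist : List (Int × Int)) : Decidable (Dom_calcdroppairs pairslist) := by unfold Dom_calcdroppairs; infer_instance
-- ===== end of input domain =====

-- B replaces A's stateful enumerate loop (carrying x0) by two projection passes zipped over adjacent slices; same O(n) cost, return value only.

-- ===== PORT A =====
-- state: (res, x0); x0 is Option Int because it is unset before the first iteration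
-- (the else branch is only reached with i ≠ 0, where x0 has been set; getD 0 is never used).
def calcdroppairs (pairslist : List (Int × Int)) : List (Int × Int) :=
  ((PySem.List.enumerate pairslist).foldl
    (fun (st : List (Int × Int) × Option Int) iv =>
      if iv.1 == 0 then
        (st.1, some iv.2.2)
      else
        (st.1 ++ [(st.2.getD 0, iv.2.1)], some iv.2.2))
    ([], none)).1

-- ===== PORT B =====
-- ends = [v[1] for v in pairslist]; starts = [v[0] for v in pairslist];
-- list(zip(ends[:-1], starts[1:]))  (ends[:-1] = dropLast, starts[1:] = drop 1)
def calcdroppairs_alt (pairslist : List (Int × Int)) : List (Int × Int) :=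
  List.zip ((pairslist.map Prod.snd).dropLast) ((pairslist.map Prod.fst).drop 1)

-- ===== PRECONDITION & SPEC =====
def Spec_calcdroppairs (pairslist : List (Int × Int)) (out : List (Int × Int)) : Prop := out = calcdroppairs_alt pairslist
instance (pairslist : List (Int × Int)) (out : List (Int × Int)) : Decidable (Spec_calcdroppairs pairslist out) := by unfold Spec_calcdroppairs; infer_instance

-- ===== CLAIM (what is proved, stated in full; the proofs are below) =====
def Claim_equal_calcdroppairs : Prop := ∀ (pairslist : List (Int × Int)), Dom_calcdroppairs pairslist → Spec_calcdroppairs pairslist (calcdroppairs pairslist)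

-- ===== LEMMAS AND PROOFS =====

-- Invariant of A's loop after the first element: folding the tail (all indices ≥ 1)
-- from state (acc, some x0) appends exactly the zip of (x0 :: ends of tail) with starts of tail.
theorem calcdroppairs_loop_inv (rest : List (Int × Int)) (k : Int) (hk : 1 ≤ k)
    (acc : List (Int × Int)) (x0 : Int) :
    ((PySem.List.enumerate rest k).foldl
      (fun (st : List (Int × Int) × Option Int) iv =>
        if iv.1 == 0 then
          (st.1, some iv.2.2)
        else
          (st.1 ++ [(st.2.getD 0, iv.2.1)], some iv.2.2))
      (acc, some x0)).1
    = acc ++ List.zip (x0 :: rest.map Prod.snd) (rest.map Prod.fst) := by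
  induction rest generalizing k acc x0 with
  | nil => simp [PySem.List.enumerate_nil]
  | cons v rest ih =>
    have hne : (k == 0) = false := by
      simp only [beq_eq_false_iff_ne]; omega
    rw [PySem.List.enumerate_cons]
    simp only [List.foldl_cons, hne, Bool.false_eq_true, if_false, Option.getD_some]
    rw [ih (k + 1) (by omega)]
    simp [List.zip]

-- zip truncates, so dropping the last of the (one-longer) left list changes nothing.
theorem zip_dropLast_eq (l : List Int) (l' : List Int) (h : l'.length < l.length) :
    List.zip l.dropLast l' = List.zip l l' := by
  induction l generalizing l' with
  | nil => simp at h
  | cons a l ih =>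
    cases l' with
    | nil => simp
    | cons b l' =>
      cases l with
      | nil => simp at h
      | cons c l =>
        simp only [List.dropLast_cons₂, List.zip_cons_cons]
        rw [ih l' (by simp at h ⊢; omega)]

-- ===== VERDICT (by name: the statement is the Claim_ definition above) =====
theorem calcdroppairs_spec : Claim_equal_calcdroppairs := by
  intro pairslist _
  unfold Spec_calcdroppairs calcdroppairs calcdroppairs_alt
  cases pairslist with
  | nil => simp [PySem.List.enumerate_nil]
  | cons v rest =>
    rw [PySem.List.enumerate_cons]
    simp only [List.foldl_cons, beq_self_eq_true, if_true, zero_add]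
    rw [calcdroppairs_loop_inv rest 1 (by omega) [] v.2]
    simp only [List.nil_append, List.map_cons, List.drop_succ_cons, List.drop_zero]
    rw [zip_dropLast_eq]
    simp
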